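-- pv_equiv track=rewrite | github.com/mpvasilis/active-ca-refinement | utils.py | multidimensional_indices_to_1d
-- ===== SOURCE A (Python) =====
-- def multidimensional_indices_to_1d(indices, dimension_sizes):
--
--     idx = 0
--     for i, ind in enumerate(indices):
--         multiplier = 1
--         for size in dimension_sizes[i+1:]:
--             multiplier *= size
--         idx += ind * multiplier
--     return idx
-- ===== SOURCE B (Python) =====
-- def multidimensional_indices_to_1d(indices, dimension_sizes):
--     # Backward pass with a running suffix-product multiplier: O(n+m).
--     m = len(dimension_sizes)
--     mult = 1
--     for size in dimension_sizes[len(indices):]: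
--         mult *= size
--     idx = 0
--     for j, ind in reversed(list(enumerate(indices))):
--         idx += ind * mult
--         if j < m:
--             mult *= dimension_sizes[j]
--     return idx
-- ===== Notes on version B (the rewrite author's own statement) =====
-- stated objective: faster
-- what changed: Replaces A's per-index inner suffix-product loop with a single backward pass that maintains a running suffix-product multiplier (after one pass over the trailing unused dimensions).
import Mathlib
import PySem

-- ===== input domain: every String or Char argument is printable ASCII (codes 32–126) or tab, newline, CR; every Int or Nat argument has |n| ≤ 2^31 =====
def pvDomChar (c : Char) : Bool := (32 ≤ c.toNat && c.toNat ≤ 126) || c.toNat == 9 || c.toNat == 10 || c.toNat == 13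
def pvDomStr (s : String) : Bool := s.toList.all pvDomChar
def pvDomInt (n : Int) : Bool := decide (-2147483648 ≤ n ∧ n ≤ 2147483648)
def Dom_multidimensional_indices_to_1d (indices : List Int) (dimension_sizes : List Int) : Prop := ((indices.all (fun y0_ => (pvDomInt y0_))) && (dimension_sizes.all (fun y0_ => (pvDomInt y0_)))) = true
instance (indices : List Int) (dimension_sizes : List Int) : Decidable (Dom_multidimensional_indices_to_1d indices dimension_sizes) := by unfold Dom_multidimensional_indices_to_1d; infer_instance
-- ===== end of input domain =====

-- B replaces A's per-index suffix-product inner loop by one backward pass carrying a running suffix-product multiplier (asymptotically faster).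


-- ===== PORT A =====
def multidimensional_indices_to_1d (indices : List Int) (dimension_sizes : List Int) : Int :=
  (PySem.List.enumerate indices).foldl
    (fun idx p =>
      idx + p.2 * ((PySem.List.slice dimension_sizes (some (p.1 + 1)) none).foldl
        (fun multiplier size => multiplier * size) 1))
    0

-- ===== PORT B =====
def multidimensional_indices_to_1d_alt (indices : List Int) (dimension_sizes : List Int) : Int :=
  let m : Int := dimension_sizes.length
  let mult : Int := (PySem.List.slice dimension_sizes (some (indices.length : Int)) none).foldl
    (fun mult size => mult * size) 1
  let st := ((PySem.List.enumerate indices).reverse).foldl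
    (fun (st : Int × Int) p =>
      (st.1 + p.2 * st.2,
       if p.1 < m then st.2 * PySem.List.pyGetD dimension_sizes p.1 0 else st.2))
    (0, mult)
  st.1

-- ===== PRECONDITION & SPEC =====
def Spec_multidimensional_indices_to_1d (indices : List Int) (dimension_sizes : List Int) (out : Int) : Prop := out = multidimensional_indices_to_1d_alt indices dimension_sizes
instance (indices : List Int) (dimension_sizes : List Int) (out : Int) : Decidable (Spec_multidimensional_indices_to_1d indices dimension_sizes out) := by unfold Spec_multidimensional_indices_to_1d; infer_instance

-- ===== CLAIM (what is proved, stated in full; the proofs are below) =====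
def Claim_equal_multidimensional_indices_to_1d : Prop := ∀ (indices : List Int) (dimension_sizes : List Int), Dom_multidimensional_indices_to_1d indices dimension_sizes → Spec_multidimensional_indices_to_1d indices dimension_sizes (multidimensional_indices_to_1d indices dimension_sizes)

-- ===== LEMMAS AND PROOFS =====

-- product of a list, as the multiplication folds compute it
def pvProd (l : List Int) : Int := l.foldl (fun a s => a * s) 1

lemma pvFoldlMul (l : List Int) : ∀ a : Int, l.foldl (fun x s => x * s) a = a * pvProd l := by
  induction l with
  | nil => intro a; simp [pvProd]
  | cons x t ih =>
    intro a
    simp only [List.foldl_cons, pvProd, ih (a * x), ih (1 * x)]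
    ring

lemma pvProd_cons (x : Int) (t : List Int) : pvProd (x :: t) = x * pvProd t := by
  simp only [pvProd, List.foldl_cons, pvFoldlMul t (1 * x)]; ring

-- reference value: sum of index k times product of the remaining sizes
def pvG : List Int → List Int → Int
  | [], _ => 0
  | i :: is, ds => i * pvProd ds.tail + pvG is ds.tail

lemma pvA_foldl (D : List Int) (is : List Int) : ∀ (k : Nat) (acc : Int),
    (PySem.List.enumerate is (k : Int)).foldl
      (fun idx p => idx + p.2 * ((PySem.List.slice D (some (p.1 + 1)) none).foldl
        (fun multiplier size => multiplier * size) 1)) acc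
      = acc + pvG is (D.drop k) := by
  induction is with
  | nil => intro k acc; simp [PySem.List.enumerate_nil, pvG]
  | cons i is ih =>
    intro k acc
    rw [PySem.List.enumerate_cons, List.foldl_cons,
        PySem.List.slice_from D (a := (k : Int) + 1) (by positivity)]
    have hn : ((k : Int) + 1).toNat = k + 1 := by omega
    have hc : (k : Int) + 1 = ((k + 1 : Nat) : Int) := by push_cast; ring
    rw [hn, hc, ih (k + 1)]
    have ht : (D.drop k).tail = D.drop (k + 1) := by
      rw [← List.drop_drop]; simp
    simp only [pvG, ht, pvProd]
    ring

lemma pvDrop_prod (D : List Int) (k : Nat) :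
    (if (k : Int) < (D.length : Int) then PySem.List.pyGetD D (k : Int) 0 else 1)
      * pvProd (D.drop (k + 1)) = pvProd (D.drop k) := by
  by_cases hk : k < D.length
  · have hget : PySem.List.pyGetD D (k : Int) 0 = D[k] := by
      rw [PySem.List.pyGetD_natCast]
      simp [List.getD_eq_getElem?_getD, hk]
    have hdrop : D.drop k = D[k] :: D.drop (k + 1) := List.drop_eq_getElem_cons hk
    rw [if_pos (by exact_mod_cast hk), hget, hdrop, pvProd_cons]
  · have h1 : D.drop k = [] := List.drop_eq_nil_of_le (by omega)
    have h2 : D.drop (k + 1) = [] := List.drop_eq_nil_of_le (by omega)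
    rw [if_neg (by exact_mod_cast hk), h1, h2, one_mul]

-- B's backward pass, stated as the foldr the reversed foldl computes
lemma pvB_foldr (D : List Int) (is : List Int) : ∀ (k : Nat) (A0 : Int),
    (PySem.List.enumerate is (k : Int)).foldr
      (fun p (st : Int × Int) =>
        (st.1 + p.2 * st.2,
         if p.1 < (D.length : Int) then st.2 * PySem.List.pyGetD D p.1 0 else st.2))
      (A0, pvProd (D.drop (k + is.length)))
      = (A0 + pvG is (D.drop k), pvProd (D.drop k)) := by
  induction is with
  | nil => intro k A0; simp [PySem.List.enumerate_nil, pvG]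
  | cons i is ih =>
    intro k A0
    rw [PySem.List.enumerate_cons, List.foldr_cons]
    have hc : (k : Int) + 1 = ((k + 1 : Nat) : Int) := by push_cast; ring
    have hlen : k + (i :: is).length = (k + 1) + is.length := by
      simp only [List.length_cons]; omega
    rw [hc, hlen, ih (k + 1)]
    have ht : (D.drop k).tail = D.drop (k + 1) := by
      rw [← List.drop_drop]; simp
    have hprod := pvDrop_prod D k
    simp only [pvG, ht, Prod.mk.injEq]
    constructor
    · ring
    · split_ifs with h
      · rw [if_pos h] at hprod; linear_combination hprod
      · rw [if_neg h] at hprod; linear_combination hprod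

-- ===== VERDICT (by name: the statement is the Claim_ definition above) =====
theorem multidimensional_indices_to_1d_spec : Claim_equal_multidimensional_indices_to_1d := by
  intro indices dimension_sizes _
  unfold Spec_multidimensional_indices_to_1d
  unfold multidimensional_indices_to_1d multidimensional_indices_to_1d_alt
  have hslice : PySem.List.slice dimension_sizes (some (indices.length : Int)) none
      = dimension_sizes.drop indices.length := by
    rw [PySem.List.slice_from dimension_sizes (a := (indices.length : Int)) (by positivity)]
    simp
  have hA := pvA_foldl dimension_sizes indices 0 0
  simp only [Nat.cast_zero, List.drop_zero, zero_add] at hA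
  rw [hA, hslice, pvFoldlMul]
  have hB := pvB_foldr dimension_sizes indices 0 (0 : Int)
  simp only [Nat.cast_zero, List.drop_zero, zero_add] at hB
  simp only [List.foldl_reverse, one_mul, hB]
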